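-- pv_equiv track=rewrite | github.com/wogikaze/arukellt | scripts/util/fix-remaining-yaml.py | fix_yaml_frontmatter
-- ===== SOURCE A (Python) =====
-- def fix_yaml_frontmatter(content: str) -> str:
--     """Fix YAML by moving everything after first invalid line to body."""
--     lines = content.split('\n')
--
--     # Find the end of frontmatter (second ---)
--     frontmatter_end = -1
--     dash_count = 0
--     for i, line in enumerate(lines):
--         if line.strip() == '---':
--             dash_count += 1
--             if dash_count == 2:
--                 frontmatter_end = i
--                 break
--
--     if frontmatter_end == -1:
--         return content
--
--     # Extract frontmatter lines
--     frontmatter_lines = lines[1:frontmatter_end]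
--
--     # Find first invalid line
--     valid_frontmatter = []
--     invalid_lines = []
--     found_invalid = False
--
--     for line in frontmatter_lines:
--         stripped = line.strip()
--         if not stripped:
--             if not found_invalid:
--                 valid_frontmatter.append(line)
--             else:
--                 invalid_lines.append(line)
--         elif ':' in stripped:
--             key_part = stripped.split(':', 1)[0].strip()
--             # Allow keys that are uppercase or known field names
--             if key_part and (key_part[0].isupper() or key_part in ['ID', 'Status', 'Created', 'Updated', 'Track', 'Depends on', 'Orchestration class', 'Orchestration upstream', 'Blocks v{N}', 'Implementation target', 'ADR candidate', 'Source', 'Priority', 'Status note']):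
--                 if found_invalid:
--                     invalid_lines.append(line)
--                 else:
--                     valid_frontmatter.append(line)
--             else:
--                 found_invalid = True
--                 invalid_lines.append(line)
--         else:
--             found_invalid = True
--             invalid_lines.append(line)
--
--     # Rebuild content
--     new_lines = ['---'] + valid_frontmatter + ['---']
--     if invalid_lines:
--         new_lines.append('')  # Add blank line before invalid content
--         new_lines.extend(invalid_lines)
--     new_lines.extend(lines[frontmatter_end + 1:])
--
--     return '\n'.join(new_lines)
-- ===== SOURCE B (Python) =====
-- KNOWN_KEYS = ['ID', 'Status', 'Created', 'Updated', 'Track', 'Depends on',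
--               'Orchestration class', 'Orchestration upstream', 'Blocks v{N}',
--               'Implementation target', 'ADR candidate', 'Source', 'Priority',
--               'Status note']
--
--
-- def _is_invalid(line):
--     stripped = line.strip()
--     if not stripped:
--         return False
--     if ':' not in stripped:
--         return True
--     key = stripped.split(':', 1)[0].strip()
--     return not (key and (key[0].isupper() or key in KNOWN_KEYS))
--
--
-- def fix_yaml_frontmatter(content):
--     lines = content.split('\n')
--     # Single forward pass: push candidate frontmatter lines onto a stack while
--     # counting '---' delimiters; once the second delimiter is seen, the
--     # remaining lines become the tail.
--     stack = []
--     tail = None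
--     dashes = 1 if lines[0].strip() == '---' else 0
--     for line in lines[1:]:
--         if line.strip() == '---':
--             dashes += 1
--             if dashes == 2:
--                 tail = []
--                 continue
--         if tail is None:
--             stack.append(line)
--         else:
--             tail.append(line)
--     if tail is None:
--         return content
--     # Backward pass: pop the stack, classifying right-to-left.  An invalid
--     # line absorbs every line classified valid so far into the invalid block
--     # (everything after the first invalid line belongs to the body).
--     v_rev, i_rev = [], []
--     while stack:
--         line = stack.pop()
--         if _is_invalid(line):
--             i_rev.extend(v_rev)
--             i_rev.append(line)
--             v_rev = []
--         else:
--             v_rev.append(line)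
--     out = ['---'] + v_rev[::-1] + ['---']
--     if i_rev:
--         out += [''] + i_rev[::-1]
--     return '\n'.join(out + tail)
-- ===== Notes on version B (the rewrite author's own statement) =====
-- stated objective: alternative
-- what changed: A's two forward scans (dash-counting loop with break, then a found_invalid flag loop over a slice) are replaced by one fused forward pass that pushes frontmatter lines onto a stack while counting delimiters, followed by a backward pass that pops the stack and classifies right-to-left with an absorption rule (an invalid line pulls every later line into the invalid block), building the output back-to-front.
import Mathlib
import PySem

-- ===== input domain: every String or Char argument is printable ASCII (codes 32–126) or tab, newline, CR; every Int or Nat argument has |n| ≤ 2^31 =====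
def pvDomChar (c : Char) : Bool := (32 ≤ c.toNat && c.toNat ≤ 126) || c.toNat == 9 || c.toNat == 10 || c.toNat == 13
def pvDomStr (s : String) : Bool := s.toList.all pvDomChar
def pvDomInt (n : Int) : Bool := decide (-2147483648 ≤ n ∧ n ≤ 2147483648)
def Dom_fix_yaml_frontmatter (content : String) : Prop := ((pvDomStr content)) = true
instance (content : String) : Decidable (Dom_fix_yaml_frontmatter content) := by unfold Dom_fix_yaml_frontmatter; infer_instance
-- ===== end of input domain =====

-- B solves the same task by a different traversal: one fused forward pass pushing
-- frontmatter lines onto a stack while counting delimiters, then a backward pass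
-- popping the stack and classifying right-to-left with an absorption rule.

-- ===== PORT A =====

-- known field names, as the inline list literal in A
def knownKeysA : List String :=
  ["ID", "Status", "Created", "Updated", "Track", "Depends on", "Orchestration class",
   "Orchestration upstream", "Blocks v{N}", "Implementation target", "ADR candidate",
   "Source", "Priority", "Status note"]

-- key_part[0].isupper(); only evaluated under the `key_part and …` guard, so key ≠ ""
def firstUpperA (key : String) : Bool :=
  match key.toList with
  | c :: _ => PySem.Chars.isupper c
  | [] => false

-- the first loop of A: enumerate with dash_count and break, returning frontmatter_end (-1 sentinel)
def findDashA (lines : List String) (i : Int) (dashCount : Nat) : Int :=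
  match lines with
  | [] => -1
  | l :: rest =>
    if PySem.Str.strip l == "---" then
      if dashCount + 1 == 2 then i else findDashA rest (i + 1) (dashCount + 1)
    else findDashA rest (i + 1) dashCount

-- one iteration of A's second loop over state (valid_frontmatter, invalid_lines, found_invalid)
def fmStepA (st : List String × List String × Bool) (line : String) :
    List String × List String × Bool :=
  let stripped := PySem.Str.strip line
  if stripped == "" then
    if !st.2.2 then (st.1 ++ [line], st.2.1, st.2.2) else (st.1, st.2.1 ++ [line], st.2.2)
  else if PySem.Str.isIn ":" stripped then
    -- stripped.split(':', 1)[0].strip(); splitMax? is some (sep ":" ≠ "") and nonempty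
    let keyPart := PySem.Str.strip ((((PySem.Str.splitMax? stripped ":" 1).getD []).headD ""))
    if keyPart != "" && (firstUpperA keyPart || knownKeysA.contains keyPart) then
      if st.2.2 then (st.1, st.2.1 ++ [line], st.2.2) else (st.1 ++ [line], st.2.1, st.2.2)
    else (st.1, st.2.1 ++ [line], true)
  else (st.1, st.2.1 ++ [line], true)

def fix_yaml_frontmatter (content : String) : String :=
  let lines := (PySem.Str.split? content "\n").getD []
  let frontmatterEnd := findDashA lines 0 0
  if frontmatterEnd == -1 then content
  else
    let frontmatterLines := PySem.List.slice lines (some 1) (some frontmatterEnd)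
    let r := frontmatterLines.foldl fmStepA ([], [], false)
    let newLines := ["---"] ++ r.1 ++ ["---"]
    let newLines := if r.2.1 ≠ [] then newLines ++ [""] ++ r.2.1 else newLines
    let newLines := newLines ++ PySem.List.slice lines (some (frontmatterEnd + 1)) none
    PySem.Str.join "\n" newLines

-- ===== PORT B =====

def knownKeysB : List String :=
  ["ID", "Status", "Created", "Updated", "Track", "Depends on", "Orchestration class",
   "Orchestration upstream", "Blocks v{N}", "Implementation target", "ADR candidate",
   "Source", "Priority", "Status note"]

-- key[0].isupper(); only evaluated under the `key and …` guard, so key ≠ ""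
def firstUpperB (key : String) : Bool :=
  match key.toList with
  | c :: _ => PySem.Chars.isupper c
  | [] => false

-- B's helper _is_invalid(line)
def isInvalidB (line : String) : Bool :=
  let stripped := PySem.Str.strip line
  if stripped == "" then false
  else if !(PySem.Str.isIn ":" stripped) then true
  else
    -- stripped.split(':', 1)[0].strip(); splitMax? is some (sep ":" ≠ "") and nonempty
    let key := PySem.Str.strip ((((PySem.Str.splitMax? stripped ":" 1).getD []).headD ""))
    !(key != "" && (firstUpperB key || knownKeysB.contains key))

-- one iteration of B's forward pass over state (stack, dashes, tail)
def fwdStep (st : List String × Int × Option (List String)) (line : String) :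
    List String × Int × Option (List String) :=
  if PySem.Str.strip line == "---" then
    let d := st.2.1 + 1
    if d == 2 then (st.1, d, some [])
    else match st.2.2 with
      | none => (st.1 ++ [line], d, none)
      | some t => (st.1, d, some (t ++ [line]))
  else match st.2.2 with
    | none => (st.1 ++ [line], st.2.1, none)
    | some t => (st.1, st.2.1, some (t ++ [line]))

-- one iteration of B's backward (stack-popping) pass over state (v_rev, i_rev)
def bwdStep (st : List String × List String) (line : String) : List String × List String :=
  if isInvalidB line then ([], st.2 ++ st.1 ++ [line]) else (st.1 ++ [line], st.2)

def fix_yaml_frontmatter_alt (content : String) : String :=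
  let lines := (PySem.Str.split? content "\n").getD []
  -- content.split('\n') is never empty, so lines[0] is total; headD "" is its value
  let st := (PySem.List.slice lines (some 1) none).foldl fwdStep
      ([], if PySem.Str.strip (lines.headD "") == "---" then (1 : Int) else 0, none)
  match st.2.2 with
  | none => content
  | some tail =>
    -- `while stack: line = stack.pop()` = a left fold over the reversed stack
    let r := st.1.reverse.foldl bwdStep ([], [])
    PySem.Str.join "\n"
      (["---"] ++ r.1.reverse ++ ["---"]
        ++ (if r.2.reverse ≠ [] then [""] ++ r.2.reverse else []) ++ tail)

-- ===== PRECONDITION & SPEC =====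
def Spec_fix_yaml_frontmatter (content : String) (out : String) : Prop := out = fix_yaml_frontmatter_alt content
instance (content : String) (out : String) : Decidable (Spec_fix_yaml_frontmatter content out) := by unfold Spec_fix_yaml_frontmatter; infer_instance

-- ===== CLAIM (what is proved, stated in full; the proofs are below) =====
def Claim_equal_fix_yaml_frontmatter : Prop := ∀ (content : String), Dom_fix_yaml_frontmatter content → Spec_fix_yaml_frontmatter content (fix_yaml_frontmatter content)

-- ===== LEMMAS AND PROOFS =====

-- split of a list at its FIRST line stripping to '---' (the part before, the part after)
def fd1 (l : List String) : Option (List String × List String) :=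
  match l with
  | [] => none
  | x :: t =>
    if PySem.Str.strip x == "---" then some ([], t)
    else match fd1 t with
      | none => none
      | some (a, b) => some (x :: a, b)

-- split of a list at its SECOND such line
def fd2 (l : List String) : Option (List String × List String) :=
  match l with
  | [] => none
  | x :: t =>
    if PySem.Str.strip x == "---" then
      match fd1 t with
      | none => none
      | some (a, b) => some (x :: a, b)
    else match fd2 t with
      | none => none
      | some (a, b) => some (x :: a, b)

lemma fd1_shape (l : List String) : ∀ a b, fd1 l = some (a, b) → ∃ x, l = a ++ x :: b := by
  induction l with
  | nil => intro a b h; simp [fd1] at h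
  | cons x t ih =>
    intro a b h
    by_cases hx : PySem.Str.strip x == "---"
    · simp [fd1, hx] at h; exact ⟨x, by simp [h]⟩
    · simp only [fd1, hx, Bool.false_eq_true, if_false] at h
      cases hfd : fd1 t with
      | none => simp [hfd] at h
      | some p =>
        obtain ⟨a', b'⟩ := p
        simp [hfd] at h
        obtain ⟨y, hy⟩ := ih a' b' hfd
        exact ⟨y, by simp [← h.1, ← h.2, hy]⟩

lemma fd2_shape (l : List String) : ∀ a b, fd2 l = some (a, b) → ∃ x, l = a ++ x :: b := by
  induction l with
  | nil => intro a b h; simp [fd2] at h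
  | cons x t ih =>
    intro a b h
    by_cases hx : PySem.Str.strip x == "---"
    · simp only [fd2, hx, if_true] at h
      cases hfd : fd1 t with
      | none => simp [hfd] at h
      | some p =>
        obtain ⟨a', b'⟩ := p
        simp [hfd] at h
        obtain ⟨y, hy⟩ := fd1_shape t a' b' hfd
        exact ⟨y, by simp [← h.1, ← h.2, hy]⟩
    · simp only [fd2, hx, Bool.false_eq_true, if_false] at h
      cases hfd : fd2 t with
      | none => simp [hfd] at h
      | some p =>
        obtain ⟨a', b'⟩ := p
        simp [hfd] at h
        obtain ⟨y, hy⟩ := ih a' b' hfd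
        exact ⟨y, by simp [← h.1, ← h.2, hy]⟩

-- A's dash loop, one dash already seen, expressed through fd1
lemma findDashA_fd1 (l : List String) : ∀ i : Int,
    findDashA l i 1 = (match fd1 l with
      | none => -1
      | some (a, _) => i + a.length) := by
  induction l with
  | nil => intro i; simp [findDashA, fd1]
  | cons x t ih =>
    intro i
    by_cases hx : PySem.Str.strip x == "---"
    · simp [findDashA, fd1, hx]
    · simp only [findDashA, fd1, hx, Bool.false_eq_true, if_false, ih]
      cases hfd : fd1 t with
      | none => rfl
      | some p => obtain ⟨a, b⟩ := p; simp; ring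

-- A's dash loop from the zero-dash state, expressed through fd2
lemma findDashA_fd2 (l : List String) : ∀ i : Int,
    findDashA l i 0 = (match fd2 l with
      | none => -1
      | some (a, _) => i + a.length) := by
  induction l with
  | nil => intro i; simp [findDashA, fd2]
  | cons x t ih =>
    intro i
    by_cases hx : PySem.Str.strip x == "---"
    · simp only [findDashA, fd2, hx, if_true]
      rw [show findDashA t (i + 1) (0 + 1) = findDashA t (i + 1) 1 from rfl,
        findDashA_fd1]
      cases hfd : fd1 t with
      | none => rfl
      | some p => obtain ⟨a, b⟩ := p; simp; ring
    · simp only [findDashA, fd2, hx, Bool.false_eq_true, if_false, ih]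
      cases hfd : fd2 t with
      | none => rfl
      | some p => obtain ⟨a, b⟩ := p; simp; ring

-- B's forward pass once the tail has started: everything is appended to the tail
lemma fwd_tail (l : List String) : ∀ (stack t : List String) (d : Int), 2 ≤ d →
    ∃ d', l.foldl fwdStep (stack, d, some t) = (stack, d', some (t ++ l)) ∧ 2 ≤ d' := by
  induction l with
  | nil => intro stack t d hd; exact ⟨d, by simp, hd⟩
  | cons x r ih =>
    intro stack t d hd
    by_cases hx : PySem.Str.strip x == "---"
    · have h2 : ((d + 1 : Int) == 2) = false := by simp; omega
      obtain ⟨d', h, hd'⟩ := ih stack (t ++ [x]) (d + 1) (by omega)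
      exact ⟨d', by simp [fwdStep, hx, h2, h], hd'⟩
    · obtain ⟨d', h, hd'⟩ := ih stack (t ++ [x]) d hd
      exact ⟨d', by simp [fwdStep, hx, h], hd'⟩

-- B's forward pass in the one-dash state, no second dash: everything is stacked
lemma fwd_one_none (l : List String) : ∀ stack, fd1 l = none →
    l.foldl fwdStep (stack, 1, none) = (stack ++ l, 1, none) := by
  induction l with
  | nil => intro stack _; simp
  | cons x t ih =>
    intro stack h
    by_cases hx : PySem.Str.strip x == "---"
    · simp [fd1, hx] at h
    · simp only [fd1, hx, Bool.false_eq_true, if_false] at h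
      cases hfd : fd1 t with
      | none => simp [List.foldl_cons, fwdStep, hx, ih (stack ++ [x]) hfd]
      | some p => obtain ⟨a, b⟩ := p; simp [hfd] at h
-- B's forward pass in the one-dash state with a dash ahead: stack = the part before it
lemma fwd_one_some (l : List String) : ∀ stack a b, fd1 l = some (a, b) →
    ∃ d : Int, l.foldl fwdStep (stack, 1, none) = (stack ++ a, d, some b) := by
  induction l with
  | nil => intro stack a b h; simp [fd1] at h
  | cons x t ih =>
    intro stack a b h
    by_cases hx : PySem.Str.strip x == "---"
    · simp [fd1, hx] at h
      obtain ⟨d', hfold, -⟩ := fwd_tail t stack [] 2 (by omega)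
      exact ⟨d', by simp [List.foldl_cons, fwdStep, hx, h.1, ← h.2, hfold]⟩
    · simp only [fd1, hx, Bool.false_eq_true, if_false] at h
      cases hfd : fd1 t with
      | none => simp [hfd] at h
      | some p =>
        obtain ⟨a', b'⟩ := p
        simp [hfd] at h
        obtain ⟨d, hfold⟩ := ih (stack ++ [x]) a' b' hfd
        exact ⟨d, by simp [List.foldl_cons, fwdStep, hx, hfold, ← h.1, ← h.2]⟩

-- same two facts from the zero-dash state, through fd2
lemma fwd_zero_none (l : List String) : ∀ stack, fd2 l = none →
    ∃ d : Int, l.foldl fwdStep (stack, 0, none) = (stack ++ l, d, none) := by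
  induction l with
  | nil => intro stack _; exact ⟨0, by simp⟩
  | cons x t ih =>
    intro stack h
    by_cases hx : PySem.Str.strip x == "---"
    · simp only [fd2, hx, if_true] at h
      cases hfd : fd1 t with
      | none => exact ⟨1, by simp [List.foldl_cons, fwdStep, hx, fwd_one_none t (stack ++ [x]) hfd]⟩
      | some p => obtain ⟨a, b⟩ := p; simp [hfd] at h
    · simp only [fd2, hx, Bool.false_eq_true, if_false] at h
      cases hfd : fd2 t with
      | none =>
        obtain ⟨d, hfold⟩ := ih (stack ++ [x]) hfd
        exact ⟨d, by simp [List.foldl_cons, fwdStep, hx, hfold]⟩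
      | some p => obtain ⟨a, b⟩ := p; simp [hfd] at h

lemma fwd_zero_some (l : List String) : ∀ stack a b, fd2 l = some (a, b) →
    ∃ d : Int, l.foldl fwdStep (stack, 0, none) = (stack ++ a, d, some b) := by
  induction l with
  | nil => intro stack a b h; simp [fd2] at h
  | cons x t ih =>
    intro stack a b h
    by_cases hx : PySem.Str.strip x == "---"
    · simp only [fd2, hx, if_true] at h
      cases hfd : fd1 t with
      | none => simp [hfd] at h
      | some p =>
        obtain ⟨a', b'⟩ := p
        simp [hfd] at h
        obtain ⟨d, hfold⟩ := fwd_one_some t (stack ++ [x]) a' b' hfd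
        exact ⟨d, by simp [List.foldl_cons, fwdStep, hx, hfold, ← h.1, ← h.2]⟩
    · simp only [fd2, hx, Bool.false_eq_true, if_false] at h
      cases hfd : fd2 t with
      | none => simp [hfd] at h
      | some p =>
        obtain ⟨a', b'⟩ := p
        simp [hfd] at h
        obtain ⟨d, hfold⟩ := ih (stack ++ [x]) a' b' hfd
        exact ⟨d, by simp [List.foldl_cons, fwdStep, hx, hfold, ← h.1, ← h.2]⟩

-- B's backward pass splits the stacked frontmatter at its first invalid line (reversed)
lemma bwd_spec (l : List String) :
    l.reverse.foldl bwdStep ([], []) =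
      ((l.take (l.findIdx isInvalidB)).reverse, (l.drop (l.findIdx isInvalidB)).reverse) := by
  rw [List.foldl_reverse]
  induction l with
  | nil => simp
  | cons x t ih =>
    rw [List.foldr_cons, ih]
    by_cases hx : isInvalidB x
    · have : (t.drop (t.findIdx isInvalidB)).reverse ++ (t.take (t.findIdx isInvalidB)).reverse
          = t.reverse := by rw [← List.reverse_append, List.take_append_drop]
      simp [bwdStep, hx, List.findIdx_cons, this]
    · simp [bwdStep, hx, List.findIdx_cons]

-- ===== A-side loop lemmas =====

-- one step of A's loop in the not-yet-found state, phrased by B's predicate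
lemma fmStepA_false (v inv : List String) (line : String) :
    fmStepA (v, inv, false) line =
      if isInvalidB line then (v, inv ++ [line], true) else (v ++ [line], inv, false) := by
  have h1 : firstUpperB = firstUpperA := rfl
  have h2 : knownKeysB = knownKeysA := rfl
  simp only [fmStepA, isInvalidB, h1, h2]
  by_cases hs : (PySem.Str.strip line == "") = true
  · simp [hs]
  · simp only [hs, Bool.false_eq_true, if_false]
    simp only [Bool.and_eq_true, bne_iff_ne, ne_eq, Bool.or_eq_true, List.contains_eq_mem,
      decide_eq_true_eq]
    split_ifs <;> simp_all

-- after found_invalid is set, every remaining line goes to invalid_lines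
lemma foldl_fmStepA_true (l : List String) : ∀ (v inv : List String),
    l.foldl fmStepA (v, inv, true) = (v, inv ++ l, true) := by
  induction l with
  | nil => intro v inv; simp
  | cons x t ih =>
    intro v inv
    have hx : fmStepA (v, inv, true) x = (v, inv ++ [x], true) := by
      simp only [fmStepA]; split_ifs <;> simp_all
    simp [List.foldl_cons, hx, ih]

-- A's flag loop splits the frontmatter at the first line satisfying B's predicate
lemma foldl_fmStepA_split (l : List String) : ∀ (v inv : List String),
    l.foldl fmStepA (v, inv, false) =
      (v ++ l.take (l.findIdx isInvalidB), inv ++ l.drop (l.findIdx isInvalidB),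
       decide (l.findIdx isInvalidB < l.length)) := by
  induction l with
  | nil => intro v inv; simp
  | cons x t ih =>
    intro v inv
    rw [List.foldl_cons, fmStepA_false]
    by_cases hx : isInvalidB x
    · simp [hx, foldl_fmStepA_true, List.findIdx_cons]
    · simp only [hx, Bool.false_eq_true, if_false, ih, List.findIdx_cons,
        cond_false, List.take_succ_cons, List.drop_succ_cons, List.length_cons]
      simp

-- frontmatter slice of A, on a list whose second dash is exposed
lemma slice_fm_eq (h x : String) (a b : List String) :
    PySem.List.slice (h :: (a ++ x :: b)) (some 1) (some (1 + (a.length : Int))) = a := by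
  have h1 : (1 : Int) = ((1 : Nat) : Int) := rfl
  rw [h1, PySem.List.slice_natCast_add]
  simp

-- tail slice of A, on the same shape
lemma slice_tail_eq (h x : String) (a b : List String) :
    PySem.List.slice (h :: (a ++ x :: b)) (some (1 + (a.length : Int) + 1)) none = b := by
  have h1 : (1 + (a.length : Int) + 1) = ((a.length + 2 : Nat) : Int) := by push_cast; ring
  rw [h1, PySem.List.slice_from_natCast,
    show a ++ x :: b = (a ++ [x]) ++ b by simp,
    show a.length + 2 = (a ++ [x]).length + 1 by simp,
    List.drop_succ_cons, List.drop_left]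

-- ===== VERDICT (by name: the statement is the Claim_ definition above) =====
theorem fix_yaml_frontmatter_spec : Claim_equal_fix_yaml_frontmatter := by
  intro content _
  unfold Spec_fix_yaml_frontmatter fix_yaml_frontmatter fix_yaml_frontmatter_alt
  rcases hl : (PySem.Str.split? content "\n").getD [] with _ | ⟨h, rest⟩
  · rfl
  · dsimp only
    rw [PySem.List.slice_from_one]
    simp only [List.tail_cons, List.headD_cons]
    by_cases hh : (PySem.Str.strip h == "---") = true
    · have hfd0 : findDashA (h :: rest) 0 0 = findDashA rest 1 1 := by
        simp [findDashA, hh]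
      rcases hfd : fd1 rest with _ | ⟨a, b⟩
      · have hA : findDashA (h :: rest) 0 0 = -1 := by rw [hfd0, findDashA_fd1, hfd]
        rw [hA, if_pos hh, fwd_one_none rest [] hfd]
        simp
      · have hA : findDashA (h :: rest) 0 0 = 1 + (a.length : Int) := by
          rw [hfd0, findDashA_fd1, hfd]
        obtain ⟨x, hx⟩ := fd1_shape rest a b hfd
        obtain ⟨d, hfold⟩ := fwd_one_some rest [] a b hfd
        rw [hA]
        have hne : ((1 + (a.length : Int)) == -1) = false := by simp; omega
        rw [hne]
        subst hx
        rw [if_pos hh]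
        simp only [List.nil_append] at hfold
        rw [hfold]
        dsimp only
        simp only [Bool.false_eq_true, if_false]
        rw [slice_fm_eq, slice_tail_eq, foldl_fmStepA_split, bwd_spec]
        simp only [List.reverse_reverse, List.nil_append]
        by_cases hinv : a.drop (a.findIdx isInvalidB) = [] <;> simp [hinv]
    · have hfd0 : findDashA (h :: rest) 0 0 = findDashA rest 1 0 := by
        simp [findDashA, hh]
      rcases hfd : fd2 rest with _ | ⟨a, b⟩
      · have hA : findDashA (h :: rest) 0 0 = -1 := by rw [hfd0, findDashA_fd2, hfd]
        obtain ⟨d, hfold⟩ := fwd_zero_none rest [] hfd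
        rw [hA, if_neg (by simp [hh] : ¬ (PySem.Str.strip h == "---") = true)]
        simp only [List.nil_append] at hfold
        rw [hfold]
        simp
      · have hA : findDashA (h :: rest) 0 0 = 1 + (a.length : Int) := by
          rw [hfd0, findDashA_fd2, hfd]
        obtain ⟨x, hx⟩ := fd2_shape rest a b hfd
        obtain ⟨d, hfold⟩ := fwd_zero_some rest [] a b hfd
        rw [hA]
        have hne : ((1 + (a.length : Int)) == -1) = false := by simp; omega
        rw [hne]
        subst hx
        rw [if_neg (by simp [hh] : ¬ (PySem.Str.strip h == "---") = true)]
        simp only [List.nil_append] at hfold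
        rw [hfold]
        dsimp only
        simp only [Bool.false_eq_true, if_false]
        rw [slice_fm_eq, slice_tail_eq, foldl_fmStepA_split, bwd_spec]
        simp only [List.reverse_reverse, List.nil_append]
        by_cases hinv : a.drop (a.findIdx isInvalidB) = [] <;> simp [hinv]
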